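-- pv_equiv track=rewrite | github.com/sileod/reasoning_core | reasoning_core/tasks/grammar.py | _build_cot
-- ===== SOURCE A (Python) =====
-- from collections import defaultdict
--
-- def _build_cot(tokens, can_stop, justifications):
--     parts = []
--
--     if can_stop and 'STOP' in justifications:
--         parts.append(f"{justifications['STOP']}⇒STOP")
--
--     grouped = defaultdict(list)
--     for tok in sorted(tokens):
--         grouped[justifications.get(tok, "continuation")].append(tok)
--
--     for reason, toks in sorted(grouped.items()):
--         if len(toks) > 3:
--             parts.append(f"{reason}⇒{{{','.join(toks)}}}")
--         else:
--             parts.extend(f"{reason}⇒{tok}" for tok in toks)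
--
--     return "\n".join(parts) if parts else "continuation"
-- ===== SOURCE B (Python) =====
-- def _build_cot(tokens, can_stop, justifications):
--     lines = []
--     if can_stop and 'STOP' in justifications:
--         lines.append(f"{justifications['STOP']}⇒STOP")
--     pairs = sorted((justifications.get(t, "continuation"), t) for t in tokens)
--     i, n = 0, len(pairs)
--     while i < n:
--         r = pairs[i][0]
--         j = i + 1
--         while j < n and pairs[j][0] == r:
--             j += 1
--         toks = [t for _, t in pairs[i:j]]
--         if len(toks) > 3:
--             lines.append(f"{r}⇒{{{','.join(toks)}}}")
--         else:
--             lines.extend(f"{r}⇒{t}" for t in toks)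
--         i = j
--     return "\n".join(lines) if lines else "continuation"
-- ===== Notes on version B (the rewrite author's own statement) =====
-- stated objective: alternative
-- what changed: Replaces the defaultdict index and the sort of its (reason, tokens) items by decorating each token with its reason, sorting the pairs once by the composite (reason, token) key, and emitting the runs of equal reason in a single scan.
import Mathlib
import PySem

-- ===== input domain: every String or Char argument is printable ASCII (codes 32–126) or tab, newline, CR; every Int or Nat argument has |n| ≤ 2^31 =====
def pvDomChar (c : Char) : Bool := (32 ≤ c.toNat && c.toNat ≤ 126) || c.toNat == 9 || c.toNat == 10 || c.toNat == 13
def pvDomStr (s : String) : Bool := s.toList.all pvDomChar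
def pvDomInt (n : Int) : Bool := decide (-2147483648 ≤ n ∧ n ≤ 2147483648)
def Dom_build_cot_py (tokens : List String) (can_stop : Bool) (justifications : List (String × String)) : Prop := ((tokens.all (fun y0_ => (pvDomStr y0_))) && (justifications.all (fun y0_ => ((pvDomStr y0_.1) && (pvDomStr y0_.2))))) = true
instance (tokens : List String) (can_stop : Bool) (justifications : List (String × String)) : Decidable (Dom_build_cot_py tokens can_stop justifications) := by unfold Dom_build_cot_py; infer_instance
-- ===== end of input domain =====

-- B replaces A's defaultdict grouping and the sort of its (reason, tokens) items by one sort of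
-- (reason, token) pairs followed by a single scan over the runs of equal reason (objective: alternative).

-- ===== PORT A =====
-- literal transliteration of _build_cot; the justifications dict is PySem.Dict.mk (first-match lookup)
def build_cot_py (tokens : List String) (can_stop : Bool) (justifications : List (String × String)) : String :=
  let j := PySem.Dict.mk justifications
  -- parts = []; if can_stop and 'STOP' in justifications: parts.append(f"{justifications['STOP']}⇒STOP")
  let parts0 : List String :=
    if can_stop && j.contains "STOP" then [j.getD "STOP" "" ++ "⇒STOP"] else []
  -- grouped = defaultdict(list); for tok in sorted(tokens): grouped[justifications.get(tok, "continuation")].append(tok)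
  let grouped : PySem.Dict String (List String) :=
    (PySem.List.sorted tokens (fun t => t) false).foldl
      (fun d tok => d.modify (j.getD tok "continuation") [] (· ++ [tok])) PySem.Dict.empty
  -- for reason, toks in sorted(grouped.items()):  -- keys are distinct (dict invariant), so Python's
  --   tuple comparison on the (reason, toks) pairs reduces to comparison of the reasons: sort by fst
  let parts : List String :=
    (PySem.List.sorted grouped.items (fun p => p.1) false).foldl
      (fun acc p =>
        if p.2.length > 3 then acc ++ [p.1 ++ "⇒{" ++ PySem.Str.join "," p.2 ++ "}"]
        else acc ++ p.2.map (fun tok => p.1 ++ "⇒" ++ tok)) parts0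
  -- return "\n".join(parts) if parts else "continuation"
  if parts.isEmpty then "continuation" else PySem.Str.join "\n" parts

-- ===== PORT B =====
-- B's index-based run scan over the sorted pairs, as the structural recursion on the suffix at i:
-- each step takes the run of pairs sharing the first pair's reason and recurses on the remainder
def runsB : List (String × String) → List (String × List String)
  | [] => []
  | (r, t) :: rest =>
    (r, t :: (rest.takeWhile (fun p => p.1 == r)).map (fun p => p.2)) ::
      runsB (rest.dropWhile (fun p => p.1 == r))
  termination_by l => l.length
  decreasing_by exact Nat.lt_succ_of_le (List.length_dropWhile_le _ _)

def build_cot_py_alt (tokens : List String) (can_stop : Bool) (justifications : List (String × String)) : String :=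
  let j := PySem.Dict.mk justifications
  let lines0 : List String :=
    if can_stop && j.contains "STOP" then [j.getD "STOP" "" ++ "⇒STOP"] else []
  -- pairs = sorted((justifications.get(t, "continuation"), t) for t in tokens)
  let pairs := PySem.List.sorted2 (tokens.map (fun t => (j.getD t "continuation", t)))
    (fun p => p.1) (fun p => p.2) false
  -- the while loop over runs of equal reason
  let lines : List String :=
    (runsB pairs).foldl
      (fun acc rt =>
        if rt.2.length > 3 then acc ++ [rt.1 ++ "⇒{" ++ PySem.Str.join "," rt.2 ++ "}"]
        else acc ++ rt.2.map (fun t => rt.1 ++ "⇒" ++ t)) lines0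
  if lines.isEmpty then "continuation" else PySem.Str.join "\n" lines

-- ===== PRECONDITION & SPEC =====
def Spec_build_cot_py (tokens : List String) (can_stop : Bool) (justifications : List (String × String)) (out : String) : Prop := out = build_cot_py_alt tokens can_stop justifications
instance (tokens : List String) (can_stop : Bool) (justifications : List (String × String)) (out : String) : Decidable (Spec_build_cot_py tokens can_stop justifications out) := by unfold Spec_build_cot_py; infer_instance

-- ===== CLAIM (what is proved, stated in full; the proofs are below) =====
def Claim_equal_build_cot_py : Prop := ∀ (tokens : List String) (can_stop : Bool) (justifications : List (String × String)), Dom_build_cot_py tokens can_stop justifications → Spec_build_cot_py tokens can_stop justifications (build_cot_py tokens can_stop justifications)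

-- ===== LEMMAS AND PROOFS =====

-- A's grouping fold, keyed through g, as the pair-fold PySem characterizes
theorem grouped_eq_pair_fold {g : String → String} (l : List String) :
    l.foldl (fun (d : PySem.Dict String (List String)) tok => d.modify (g tok) [] (· ++ [tok]))
      PySem.Dict.empty
    = (l.map (fun t => (g t, t))).foldl (fun d p => d.modify p.1 [] (· ++ [p.2])) PySem.Dict.empty := by
  rw [List.foldl_map]

theorem grouped_getD {g : String → String} (l : List String) (c : String) :
    (l.foldl (fun (d : PySem.Dict String (List String)) tok =>
        d.modify (g tok) [] (· ++ [tok])) PySem.Dict.empty).getD c []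
    = l.filter (fun t => g t == c) := by
  rw [grouped_eq_pair_fold, PySem.Dict.getD_foldl_modify_append]
  simp [List.filter_map, Function.comp_def]

theorem grouped_keys {g : String → String} (l : List String) :
    (l.foldl (fun (d : PySem.Dict String (List String)) tok =>
        d.modify (g tok) [] (· ++ [tok])) PySem.Dict.empty).keys
    = PySem.Set.ofList (l.map g) := by
  have h := PySem.Dict.keys_foldl_modify_key (l := l) (key := g) (d0 := ([] : List String))
    (f := fun _ tok v => v ++ [tok]) (d := PySem.Dict.empty)
  simpa [PySem.Dict.keys_empty, PySem.Set.update_nil_left] using h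

theorem grouped_keys_nodup {g : String → String} (l : List String) :
    (l.foldl (fun (d : PySem.Dict String (List String)) tok =>
        d.modify (g tok) [] (· ++ [tok])) PySem.Dict.empty).keys.Nodup := by
  exact PySem.Dict.nodup_keys_foldl_modify_key l g [] (fun _ tok v => v ++ [tok])
    PySem.Dict.empty PySem.Dict.nodup_keys_empty

-- the sorted items of A's grouped dict: sorted distinct reasons paired with their filters
theorem sorted_items_eq (g : String → String) (l : List String) :
    PySem.List.sorted
      ((l.foldl (fun (d : PySem.Dict String (List String)) tok =>
          d.modify (g tok) [] (· ++ [tok])) PySem.Dict.empty).items)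
      (fun p => p.1) false
    = (PySem.List.sorted (PySem.Set.ofList (l.map g)) (fun r => r) false).map
        (fun r => (r, l.filter (fun t => g t == r))) := by
  set d := l.foldl (fun (d : PySem.Dict String (List String)) tok =>
      d.modify (g tok) [] (· ++ [tok])) PySem.Dict.empty with hd
  apply PySem.List.sorted_eq_of_perm_of_pairwise_lt
  · have hitems : d.items = d.keys.map (fun k => (k, d.getD k [])) :=
      PySem.Dict.items_eq_map_keys d (grouped_keys_nodup l) []
    have hperm : (PySem.List.sorted (PySem.Set.ofList (l.map g)) (fun r => r) false).Perm d.keys := by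
      rw [grouped_keys]; exact PySem.List.sorted_perm _ _ _
    have hmap : (PySem.List.sorted (PySem.Set.ofList (l.map g)) (fun r => r) false).map
        (fun r => (r, l.filter (fun t => g t == r)))
        = (PySem.List.sorted (PySem.Set.ofList (l.map g)) (fun r => r) false).map
            (fun k => (k, d.getD k [])) := by
      apply List.map_congr_left
      intro r _
      rw [hd, grouped_getD]
    rw [hitems, hmap]
    exact hperm.map _
  · rw [List.pairwise_map]
    exact (PySem.List.sorted_ofList_pairwise_lt (xs := l.map g)).imp (fun h => h)

-- Python's sort of (reason, token) tuples is the sort by the lexicographic key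
theorem sorted2_eq_sorted_lex (xs : List (String × String)) :
    PySem.List.sorted2 xs (fun p => p.1) (fun p => p.2) false
      = PySem.List.sorted xs (fun p => (toLex p : String ×ₗ String)) false := by
  rw [PySem.List.sorted_eq_foldl_insertBy]
  show xs.foldl (fun acc x => PySem.List.insertBy
      (fun a b => decide (a.1 < b.1) || (!decide (b.1 < a.1) && decide (a.2 < b.2))) x acc) [] = _
  congr 1
  funext acc x
  congr 1
  funext a b
  have h : ((toLex a : String ×ₗ String) < toLex b) ↔ (a.1 < b.1 ∨ (¬ b.1 < a.1 ∧ a.2 < b.2)) := by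
    rw [Prod.Lex.lt_iff]
    show a.1 < b.1 ∨ a.1 = b.1 ∧ a.2 < b.2 ↔ _
    constructor
    · rintro (h1 | ⟨h1, h2⟩)
      · exact Or.inl h1
      · exact Or.inr ⟨by rw [h1]; exact lt_irrefl _, h2⟩
    · rintro (h1 | ⟨h1, h2⟩)
      · exact Or.inl h1
      · by_cases hlt : a.1 < b.1
        · exact Or.inl hlt
        · exact Or.inr ⟨le_antisymm (not_lt.1 h1) (not_lt.1 hlt), h2⟩
  have hb : ∀ (u v : List Char), (!decide (v < u)) = decide (u ≤ v) := by
    intro u v; rw [← decide_not]; exact decide_eq_decide.mpr not_lt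
  simp [h, hb]

-- partitioning a list by the distinct values of g is a permutation
theorem flat_filter_perm (g : String → String) :
    ∀ (rs : List String), rs.Nodup → ∀ (l : List String), (∀ t ∈ l, g t ∈ rs) →
      (rs.flatMap (fun r => l.filter (fun t => g t == r))).Perm l := by
  intro rs
  induction rs with
  | nil =>
    intro _ l hcov
    have hl : l = [] := List.eq_nil_iff_forall_not_mem.mpr (fun t ht => by simpa using hcov t ht)
    simp [hl]
  | cons r rs ih =>
    intro hnd l hcov
    have hr : r ∉ rs := (List.nodup_cons.mp hnd).1
    have hnd' := (List.nodup_cons.mp hnd).2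
    rw [List.flatMap_cons]
    have hcongr : rs.flatMap (fun r' => l.filter (fun t => g t == r'))
        = rs.flatMap (fun r' => (l.filter (fun t => !(g t == r))).filter (fun t => g t == r')) := by
      apply List.flatMap_congr
      intro r' hr'
      rw [List.filter_filter]
      apply List.filter_congr
      intro t _
      by_cases hc : g t = r'
      · have hne : r' ≠ r := fun hrr => hr (hrr ▸ hr')
        simp [hc, hne]
      · simp [hc]
    rw [hcongr]
    have hcov' : ∀ t ∈ l.filter (fun t => !(g t == r)), g t ∈ rs := by
      intro t ht
      have h1 := List.mem_filter.mp ht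
      have h2 := hcov t h1.1
      have h3 : ¬ g t = r := by simpa using h1.2
      rcases List.mem_cons.mp h2 with h | h
      · exact absurd h h3
      · exact h
    exact ((ih hnd' _ hcov').append_left _).trans (List.filter_append_perm _ l)

-- helper: takeWhile/dropWhile over a constant-reason block
theorem takeWhile_map_const (r : String) (ts : List String) :
    (ts.map (fun t => (r, t))).takeWhile (fun p => p.1 == r) = ts.map (fun t => (r, t)) := by
  induction ts with
  | nil => rfl
  | cons a l ih => simp [ih]

theorem dropWhile_map_const (r : String) (ts : List String) :
    (ts.map (fun t => (r, t))).dropWhile (fun p => p.1 == r) = [] := by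
  induction ts with
  | nil => rfl
  | cons a l ih => simp [ih]

-- the run scan recovers the groups from the flattened group list
theorem runsB_flat :
    ∀ (L : List (String × List String)),
      (∀ p ∈ L, p.2 ≠ []) → L.Pairwise (fun p q => p.1 ≠ q.1) →
      runsB (L.flatMap (fun p => p.2.map (fun t => (p.1, t)))) = L := by
  intro L
  induction L with
  | nil => intro _ _; simp [runsB]
  | cons hd L ih =>
    intro hne hpw
    obtain ⟨r, toks⟩ := hd
    have htoks : toks ≠ [] := hne (r, toks) (List.mem_cons_self ..)
    obtain ⟨t0, ts, rfl⟩ : ∃ a l, toks = a :: l := by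
      cases toks with
      | nil => exact absurd rfl htoks
      | cons a l => exact ⟨a, l, rfl⟩
    rw [List.flatMap_cons]
    simp only [List.map_cons, List.cons_append]
    rw [runsB]
    have hrestne : ∀ q ∈ L.flatMap (fun p => p.2.map (fun t => (p.1, t))), (q.1 == r) = false := by
      intro q hq
      obtain ⟨p, hp, hq2⟩ := List.mem_flatMap.mp hq
      obtain ⟨t, _, rfl⟩ := List.mem_map.mp hq2
      have hne' : r ≠ p.1 := (List.pairwise_cons.mp hpw).1 p hp
      simp [Ne.symm hne']
    have htwrest : (L.flatMap (fun p => p.2.map (fun t => (p.1, t)))).takeWhile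
        (fun p => p.1 == r) = [] := by
      cases hre : L.flatMap (fun p => p.2.map (fun t => (p.1, t))) with
      | nil => rfl
      | cons q qs =>
        have := hrestne q (by rw [hre]; simp)
        simp [this]
    have hdwrest : (L.flatMap (fun p => p.2.map (fun t => (p.1, t)))).dropWhile
        (fun p => p.1 == r) = L.flatMap (fun p => p.2.map (fun t => (p.1, t))) := by
      cases hre : L.flatMap (fun p => p.2.map (fun t => (p.1, t))) with
      | nil => rfl
      | cons q qs =>
        have := hrestne q (by rw [hre]; simp)
        simp [this]
    rw [List.takeWhile_append, List.dropWhile_append]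
    rw [takeWhile_map_const, dropWhile_map_const]
    simp [htwrest, hdwrest,
      ih (fun p hp => hne p (List.mem_cons_of_mem _ hp)) (List.pairwise_cons.mp hpw).2,
      List.map_map, Function.comp_def]

theorem runsB_groups (R : List String) (f : String → List String)
    (hne : ∀ r ∈ R, f r ≠ []) (hpw : R.Pairwise (· ≠ ·)) :
    runsB (R.flatMap (fun r => (f r).map (fun t => (r, t)))) = R.map (fun r => (r, f r)) := by
  have h := runsB_flat (R.map (fun r => (r, f r)))
    (by intro p hp; obtain ⟨r, hr, rfl⟩ := List.mem_map.mp hp; exact hne r hr)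
    (by rw [List.pairwise_map]; exact hpw)
  rw [← h, List.flatMap_map]

-- B's sorted pair list IS the flattened list of A's sorted groups
theorem pairs_eq (g : String → String) (tokens : List String) :
    PySem.List.sorted (tokens.map (fun t => (g t, t)))
        (fun p => (toLex p : String ×ₗ String)) false
    = (PySem.List.sorted (PySem.Set.ofList
          ((PySem.List.sorted tokens (fun t => t) false).map g)) (fun r => r) false).flatMap
        (fun r => ((PySem.List.sorted tokens (fun t => t) false).filter
            (fun t => g t == r)).map (fun t => (r, t))) := by
  set st := PySem.List.sorted tokens (fun t => t) false with hst
  set R := PySem.List.sorted (PySem.Set.ofList (st.map g)) (fun r => r) false with hR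
  apply PySem.List.eq_of_perm_of_pairwise_le_of_injective
    (key := fun p => (toLex p : String ×ₗ String)) toLex.injective
  · -- permutation
    have hcov : ∀ t ∈ st, g t ∈ R := by
      intro t ht
      rw [hR, PySem.List.mem_sorted, PySem.Set.mem_ofList]
      exact List.mem_map_of_mem ht
    have hnd : R.Nodup := ((PySem.List.sorted_perm _ _ _).nodup_iff).mpr
      (PySem.Set.nodup_ofList _)
    have h2 := (flat_filter_perm g R hnd st hcov).map (fun t => (g t, t))
    have h3 : R.flatMap (fun r => (st.filter (fun t => g t == r)).map (fun t => (r, t)))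
        = (R.flatMap (fun r => st.filter (fun t => g t == r))).map (fun t => (g t, t)) := by
      rw [List.map_flatMap]
      apply List.flatMap_congr
      intro r _
      apply List.map_congr_left
      intro t ht
      have hgt : g t = r := by simpa using (List.mem_filter.mp ht).2
      rw [hgt]
    have h4 : (st.map (fun t => (g t, t))).Perm (tokens.map (fun t => (g t, t))) :=
      (PySem.List.sorted_perm _ _ _).map _
    have hFL : (R.flatMap (fun r => (st.filter (fun t => g t == r)).map
        (fun t => (r, t)))).Perm (tokens.map (fun t => (g t, t))) := by
      rw [h3]; exact h2.trans h4
    exact (PySem.List.sorted_perm _ _ _).trans hFL.symm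
  · exact PySem.List.sorted_pairwise _ _
  · rw [List.pairwise_flatMap]
    constructor
    · intro r _
      rw [List.pairwise_map]
      have hstpw : st.Pairwise (fun a b => a ≤ b) := by
        have := PySem.List.sorted_pairwise tokens (fun t => t)
        simpa [hst] using this
      refine List.Pairwise.imp ?_ (hstpw.filter (fun t => g t == r))
      intro a b hab
      exact Prod.Lex.le_iff.mpr (Or.inr ⟨rfl, hab⟩)
    · have hRpw : R.Pairwise (· < ·) := by
        rw [hR]; exact PySem.List.sorted_ofList_pairwise_lt _
      refine hRpw.imp ?_
      intro a b hab x hx y hy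
      obtain ⟨tx, _, rfl⟩ := List.mem_map.mp hx
      obtain ⟨ty, _, rfl⟩ := List.mem_map.mp hy
      exact le_of_lt (Prod.Lex.lt_iff.mpr (Or.inl hab))

theorem build_cot_eq (tokens : List String) (can_stop : Bool)
    (justifications : List (String × String)) :
    build_cot_py tokens can_stop justifications
      = build_cot_py_alt tokens can_stop justifications := by
  unfold build_cot_py build_cot_py_alt
  set j := PySem.Dict.mk justifications with hj
  set st := PySem.List.sorted tokens (fun t => t) false with hst
  have hit := sorted_items_eq (fun t => j.getD t "continuation") st
  have hcov : ∀ r ∈ PySem.List.sorted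
      (PySem.Set.ofList (st.map (fun t => j.getD t "continuation"))) (fun r => r) false,
      st.filter (fun t => j.getD t "continuation" == r) ≠ [] := by
    intro r hr
    rw [PySem.List.mem_sorted, PySem.Set.mem_ofList] at hr
    obtain ⟨t, ht, hgt⟩ := List.mem_map.mp hr
    intro hnil
    have : t ∈ st.filter (fun t => j.getD t "continuation" == r) :=
      List.mem_filter.mpr ⟨ht, by simp [hgt]⟩
    rw [hnil] at this
    exact absurd this (List.not_mem_nil)
  have hpw : (PySem.List.sorted
      (PySem.Set.ofList (st.map (fun t => j.getD t "continuation"))) (fun r => r) false).Pairwise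
      (· ≠ ·) :=
    (PySem.List.sorted_ofList_pairwise_lt _).imp (fun {a b} h => ne_of_lt h)
  have hruns := runsB_groups
    (PySem.List.sorted (PySem.Set.ofList (st.map (fun t => j.getD t "continuation")))
      (fun r => r) false)
    (fun r => st.filter (fun t => j.getD t "continuation" == r)) hcov hpw
  have hpairs := pairs_eq (fun t => j.getD t "continuation") tokens
  simp only [hit, sorted2_eq_sorted_lex, ← hst, hpairs, hruns]

-- ===== VERDICT (by name: the statement is the Claim_ definition above) =====
theorem build_cot_py_spec : Claim_equal_build_cot_py := by
  intro tokens can_stop justifications _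
  exact build_cot_eq tokens can_stop justifications
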